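-- pv_equiv track=rewrite | github.com/pypi-data/pypi-mirror-13 | packages/angora/angora-0.0.1.zip/angora-0.0.1/angora/text/formatter.py | fmt_sentence
-- ===== SOURCE A (Python) =====
-- def fmt_sentence(text):
--     """English sentence formatter.
--
--     First letter is always upper case. Example:
--     "Do you want to build a snow man?"
--
--     **中文文档**
--
--     句子格式。每句话的第一个单词第一个字母大写。
--     """
--     if len(text) == 0: # if empty string, return it
--         return text
--     else:
--         text = text.lower() # lower all char
--         # delete redundant empty space
--         chunks = [chunk for chunk in text.split(" ") if len(chunk) >= 1]
--         chunks[0] = chunks[0][0].upper() + chunks[0][1:]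
--         return " ".join(chunks)
-- ===== SOURCE B (Python) =====
-- def fmt_sentence(text):
--     """Single left-to-right pass with a pending-space flag instead of
--     split/filter/join: lowercase each char, drop leading spaces, collapse
--     inner space runs to one, drop trailing spaces, then upper-case out[0]."""
--     if len(text) == 0:
--         return text
--     out = []
--     pending = False
--     for ch in text.lower():
--         if ch == ' ':
--             if out:
--                 pending = True
--         else:
--             if pending:
--                 out.append(' ')
--                 pending = False
--             out.append(ch)
--     out[0] = out[0].upper()
--     return ''.join(out)
-- ===== Notes on version B (the rewrite author's own statement) =====
-- stated objective: alternative
-- what changed: Replaces the split-on-space / filter / join pipeline with a single left-to-right pass over the characters driven by a pending-space flag that collapses space runs and trims ends in one sweep.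
import Mathlib
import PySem

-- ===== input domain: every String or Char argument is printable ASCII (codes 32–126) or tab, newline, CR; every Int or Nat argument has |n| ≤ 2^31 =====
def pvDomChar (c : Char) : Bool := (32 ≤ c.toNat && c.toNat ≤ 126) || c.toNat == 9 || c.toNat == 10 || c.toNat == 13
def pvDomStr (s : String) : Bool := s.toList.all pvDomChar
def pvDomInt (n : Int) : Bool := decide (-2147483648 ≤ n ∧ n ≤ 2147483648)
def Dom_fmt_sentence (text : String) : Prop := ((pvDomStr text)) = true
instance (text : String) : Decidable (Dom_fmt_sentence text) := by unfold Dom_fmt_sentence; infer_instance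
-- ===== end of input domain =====

-- B replaces A's split/filter/join pipeline with a single left-to-right pass driven by a
-- pending-space flag (same result, same cost; a genuinely different traversal).


-- ===== PORT A =====
def fmt_sentence (text : String) : String :=
  if PySem.Str.len text = 0 then text
  else
    let t := PySem.Chars.lower text.toList
    let chunks := (PySem.Chars.splitOn t [' ']).filter (fun c => 1 ≤ c.length)
    match chunks with
    | [] => ""    -- Python raises IndexError here (chunks[0] on empty list); excluded by Pre_
    | c0 :: rest =>
      -- chunks[0] = chunks[0][0].upper() + chunks[0][1:]  (c0 is nonempty by the filter)
      let c0' := match c0 with | [] => [] | h :: tl => PySem.Chars.upperChar h :: tl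
      String.ofList (PySem.Chars.join [' '] (c0' :: rest))

-- ===== PORT B =====
-- one step of Source B's loop body on the state (out, pending)
def fmtStep (st : List Char × Bool) (ch : Char) : List Char × Bool :=
  if ch = ' ' then
    if st.1 ≠ [] then (st.1, true) else st
  else
    ((if st.2 then st.1 ++ [' '] else st.1) ++ [ch], false)

def fmt_sentence_alt (text : String) : String :=
  if PySem.Str.len text = 0 then text
  else
    let st := (PySem.Chars.lower text.toList).foldl fmtStep ([], false)
    match st.1 with
    | [] => ""    -- Python raises IndexError here (out[0] on empty list); excluded by Pre_
    | h :: tl => String.ofList (PySem.Chars.upperChar h :: tl)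

-- ===== PRECONDITION & SPEC =====
-- Pre_ excludes exactly the nonempty all-space strings, on which Python A raises IndexError
-- (chunks[0] of an empty chunk list); B's Python raises IndexError there too.
def Pre_fmt_sentence (text : String) : Prop :=
  text = "" ∨ (text.toList.any (fun c => c ≠ ' ')) = true
instance (text : String) : Decidable (Pre_fmt_sentence text) := by
  unfold Pre_fmt_sentence; infer_instance
def pvWitness_fmt_sentence : String := "hello  World "

def Spec_fmt_sentence (text : String) (out : String) : Prop := out = fmt_sentence_alt text
instance (text : String) (out : String) : Decidable (Spec_fmt_sentence text out) := by unfold Spec_fmt_sentence; infer_instance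

-- ===== CLAIM (what is proved, stated in full; the proofs are below) =====
def Claim_equal_fmt_sentence : Prop := ∀ (text : String), Dom_fmt_sentence text → Pre_fmt_sentence text → Spec_fmt_sentence text (fmt_sentence text)

-- ===== LEMMAS AND PROOFS =====

-- structural spec of Python's s.split(" ") on List Char
def spl : List Char → List (List Char)
  | [] => [[]]
  | a :: s => if a = ' ' then [] :: spl s else (spl s).modifyHead (a :: ·)

theorem spl_ne_nil (l : List Char) : spl l ≠ [] := by
  cases l with
  | nil => simp [spl]
  | cons a s =>
    simp only [spl]
    split
    · simp
    · cases h : spl s with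
      | nil => exact absurd h (spl_ne_nil s)
      | cons x xs => simp

theorem modifyHead_comp {α : Type} (f g : List α → List α) (l : List (List α)) :
    (l.modifyHead g).modifyHead f = l.modifyHead (fun x => f (g x)) := by
  cases l <;> simp

theorem splitOn_go_spec (fuel : Nat) (l cur : List Char) (acc : List (List Char))
    (h : l.length ≤ fuel) :
    PySem.Chars.splitOn.go [' '] fuel l cur acc
      = acc.reverse ++ (spl l).modifyHead (cur.reverse ++ ·) := by
  induction fuel generalizing l cur acc with
  | zero =>
    interval_cases hl : l.length
    rw [List.length_eq_zero_iff] at hl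
    subst hl
    simp [PySem.Chars.splitOn.go, spl]
  | succ fuel ih =>
    cases l with
    | nil => simp [PySem.Chars.splitOn.go, spl]
    | cons c rest =>
      rw [PySem.Chars.splitOn.go]
      by_cases hc : c = ' '
      · subst hc
        have hpre : [' '].isPrefixOf (' ' :: rest) = true := by simp [List.isPrefixOf]
        simp only [hpre, if_true, List.length_singleton, List.drop_one, List.tail_cons]
        rw [ih rest [] (cur.reverse :: acc) (by simpa using Nat.le_of_succ_le_succ h)]
        cases hs : spl rest <;> simp [spl, hs]
      · have hpre : [' '].isPrefixOf (c :: rest) = false := by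
          simp only [List.isPrefixOf, Bool.and_true]
          exact beq_eq_false_iff_ne.mpr (Ne.symm hc)
        simp only [hpre, Bool.false_eq_true, if_false]
        rw [ih rest (c :: cur) acc (by simpa using Nat.le_of_succ_le_succ h)]
        simp only [spl, hc, if_false, modifyHead_comp]
        congr 1
        cases hs : spl rest with
        | nil => exact absurd hs (spl_ne_nil rest)
        | cons x xs => simp

theorem splitOn_eq_spl (t : List Char) : PySem.Chars.splitOn t [' '] = spl t := by
  rw [PySem.Chars.splitOn, splitOn_go_spec (t.length + 1) t [] [] (by omega)]
  cases h : spl t with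
  | nil => exact absurd h (spl_ne_nil t)
  | cons x xs => simp

-- words = nonempty chunks; glue = the tail of a join (each word preceded by one space)
def Wf (t : List Char) : List (List Char) := (spl t).filter (fun c => c ≠ [])

def glue (ws : List (List Char)) : List Char := ws.flatMap (fun w => ' ' :: w)

def joinSp : List (List Char) → List Char
  | [] => []
  | w :: ws => w ++ glue ws

theorem join_eq_joinSp (ws : List (List Char)) :
    PySem.Chars.join [' '] ws = joinSp ws := by
  cases ws with
  | nil => simp [PySem.Chars.join_nil, joinSp]
  | cons w rest =>
    induction rest generalizing w with
    | nil => simp [PySem.Chars.join_singleton, joinSp, glue]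
    | cons b l ih =>
      rw [PySem.Chars.join_cons_cons, ih b]
      simp [joinSp, glue]

theorem filter_len_eq_Wf (t : List Char) :
    (spl t).filter (fun c => 1 ≤ c.length) = Wf t := by
  unfold Wf
  apply List.filter_congr
  intro x _
  cases x <;> simp

-- the fold invariant, for a nonempty accumulated output
theorem fold_invariant (t : List Char) : ∀ out : List Char, out ≠ [] →
    (t.foldl fmtStep (out, true)).1 = out ++ glue (Wf t)
    ∧ (t.foldl fmtStep (out, false)).1
        = out ++ (spl t).headI ++ glue ((spl t).tail.filter (fun c => c ≠ [])) := by
  induction t with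
  | nil => intro out _; simp [Wf, spl, glue]
  | cons a r ih =>
    intro out hout
    by_cases ha : a = ' '
    · subst ha
      have step_sp : ∀ p : Bool, fmtStep (out, p) ' ' = (out, true) := by
        intro p; simp [fmtStep, hout]
      constructor
      · rw [List.foldl_cons, step_sp, (ih out hout).1]
        simp [Wf, spl]
      · rw [List.foldl_cons, step_sp, (ih out hout).1]
        simp [Wf, spl]
    · have step_t : fmtStep (out, true) a = (out ++ [' ', a], false) := by
        simp [fmtStep, ha]
      have step_f : fmtStep (out, false) a = (out ++ [a], false) := by
        simp [fmtStep, ha]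
      cases hs : spl r with
      | nil => exact absurd hs (spl_ne_nil r)
      | cons h rest =>
        constructor
        · rw [List.foldl_cons, step_t,
            (ih (out ++ [' ', a]) (by simp)).2, hs]
          simp only [Wf, spl, ha, if_false, hs]
          simp [glue]
        · rw [List.foldl_cons, step_f, (ih (out ++ [a]) (by simp)).2, hs]
          simp [spl, ha, hs]

theorem fold_from_empty (t : List Char) :
    (t.foldl fmtStep ([], false)).1 = joinSp (Wf t) := by
  induction t with
  | nil => simp [Wf, spl, joinSp]
  | cons a r ih =>
    by_cases ha : a = ' '
    · subst ha
      have step0 : fmtStep (([] : List Char), false) ' ' = ([], false) := by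
        simp [fmtStep]
      rw [List.foldl_cons, step0, ih]
      simp [Wf, spl]
    · have step : fmtStep (([] : List Char), false) a = ([a], false) := by
        simp [fmtStep, ha]
      cases hs : spl r with
      | nil => exact absurd hs (spl_ne_nil r)
      | cons h rest =>
        rw [List.foldl_cons, step, (fold_invariant r [a] (by simp)).2, hs]
        simp only [Wf, spl, ha, if_false, hs]
        simp [joinSp, glue]

-- ===== VERDICT (by name: the statement is the Claim_ definition above) =====
theorem fmt_sentence_spec : Claim_equal_fmt_sentence := by
  intro text _ _
  unfold Spec_fmt_sentence fmt_sentence fmt_sentence_alt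
  by_cases h0 : PySem.Str.len text = 0
  · have he : text = "" := String.toList_eq_nil_iff.mp (by
      rw [PySem.Str.len_eq] at h0
      exact List.length_eq_zero_iff.mp (by exact_mod_cast h0))
    subst he
    rfl
  · simp only [h0, if_false]
    rw [splitOn_eq_spl, filter_len_eq_Wf, fold_from_empty]
    cases hw : Wf (PySem.Chars.lower text.toList) with
    | nil => rfl
    | cons c0 rest =>
      have hc0 : c0 ≠ [] := by
        have hm : c0 ∈ Wf (PySem.Chars.lower text.toList) := by
          rw [hw]; exact List.mem_cons_self
        simp only [Wf, List.mem_filter] at hm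
        simpa using hm.2
      cases c0 with
      | nil => exact absurd rfl hc0
      | cons x xs =>
        show String.ofList (PySem.Chars.join [' '] ((PySem.Chars.upperChar x :: xs) :: rest))
            = match joinSp ((x :: xs) :: rest) with
              | [] => ""
              | h :: tl => String.ofList (PySem.Chars.upperChar h :: tl)
        rw [join_eq_joinSp]
        simp [joinSp]
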